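-- pv_equiv track=rewrite | github.com/ablab/stringdecomposer | sd/scripts/run_hordecomposer.py | collapse_name
-- ===== SOURCE A (Python) =====
-- def collapse_name(mono_seq, mono_mp, hor, hor_id):
--     mono_lst = mono_seq.split(",")
--     if len(mono_lst) == 1:
--        #if mono_lst[0] not in mono_mp:
--        rev = "'" if mono_lst[0].endswith("'") else ""
--        if mono_lst[0][1] in "0123456789X":
--            return mono_lst[0][0] + rev
--        else:
--            return mono_lst[0][:2] + rev
--        #else:
--        #    return str(mono_mp[mono_lst[0]])
--     res = ""
--     start, end = mono_mp[mono_lst[0]], mono_mp[mono_lst[0]]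
--     for i in range(1, len(mono_lst)):
--         if mono_mp[mono_lst[i-1]] + 1 == mono_mp[mono_lst[i]]:
--            end = mono_mp[mono_lst[i]]
--         else:
--            if end >= start or (start < 0 and end <= start):
--               res += str(start) + "-" + str(end) + ","
--            else:
--               res += str(start) + ","
--            start, end = mono_mp[mono_lst[i]], mono_mp[mono_lst[i]]
--     if end >= start or (start < 0 and end <= start):
--         res += str(start) + "-" + str(end)
--     else:
--         res += str(start)
--     if len(mono_lst) == hor[1] and hor_id == 0:
--         if start < 0:
--             num = "-" + res[1:].split("-")[0]
--         else:
--             num = res.split("-")[0]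
--         return "c<sub>" + num + "</sub>"
--     elif len(mono_lst) == hor[1] and hor_id > 0:
--         if start < 0:
--             num = "-" + res[1:].split("-")[0]
--         else:
--             num = res.split("-")[0]
--         return "c" + str(hor_id) + "<sub>" + num + "</sub>"
--     else:
--         s, e = res.split("-")[0], res.split("-")[-1]
--         if start < 0:
--             s = "-" + res[1:].split("-")[0]
--         if end < 0:
--             e = "-" + res.split("-")[-1]
--         return "p<sub>" + s + "-" + e + "</sub>"
-- ===== SOURCE B (Python) =====
-- def collapse_name(mono_seq, mono_mp, hor, hor_id):
--     mono_lst = mono_seq.split(",")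
--     if len(mono_lst) == 1:
--         rev = "'" if mono_lst[0].endswith("'") else ""
--         if mono_lst[0][1] in "0123456789X":
--             return mono_lst[0][0] + rev
--         return mono_lst[0][:2] + rev
--     # pass 1: indices; pass 2: group into maximal consecutive runs; then render
--     idx = [mono_mp[m] for m in mono_lst]
--     groups = []
--     for v in idx:
--         if groups and v == groups[-1][1] + 1:
--             groups[-1] = (groups[-1][0], v)
--         else:
--             groups.append((v, v))
--     res = ",".join(str(s) + "-" + str(e) for s, e in groups)
--     start, end = groups[-1]
--     if len(mono_lst) == hor[1] and hor_id == 0: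
--         if start < 0:
--             num = "-" + res[1:].split("-")[0]
--         else:
--             num = res.split("-")[0]
--         return "c<sub>" + num + "</sub>"
--     elif len(mono_lst) == hor[1] and hor_id > 0:
--         if start < 0:
--             num = "-" + res[1:].split("-")[0]
--         else:
--             num = res.split("-")[0]
--         return "c" + str(hor_id) + "<sub>" + num + "</sub>"
--     else:
--         s, e = res.split("-")[0], res.split("-")[-1]
--         if start < 0:
--             s = "-" + res[1:].split("-")[0]
--         if end < 0:
--             e = "-" + res.split("-")[-1]
--         return "p<sub>" + s + "-" + e + "</sub>"
-- ===== Notes on version B (the rewrite author's own statement) =====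
-- stated objective: alternative
-- what changed: B replaces A's single interleaved loop (two dict lookups per step, incremental string building with a conditional flush duplicated after the loop) by separate passes: map the monomers to an index list once, group it into maximal consecutive (start,end) runs, then render all runs with one join; the single-element shortcut and the final formatting block are unchanged.
import Mathlib
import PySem

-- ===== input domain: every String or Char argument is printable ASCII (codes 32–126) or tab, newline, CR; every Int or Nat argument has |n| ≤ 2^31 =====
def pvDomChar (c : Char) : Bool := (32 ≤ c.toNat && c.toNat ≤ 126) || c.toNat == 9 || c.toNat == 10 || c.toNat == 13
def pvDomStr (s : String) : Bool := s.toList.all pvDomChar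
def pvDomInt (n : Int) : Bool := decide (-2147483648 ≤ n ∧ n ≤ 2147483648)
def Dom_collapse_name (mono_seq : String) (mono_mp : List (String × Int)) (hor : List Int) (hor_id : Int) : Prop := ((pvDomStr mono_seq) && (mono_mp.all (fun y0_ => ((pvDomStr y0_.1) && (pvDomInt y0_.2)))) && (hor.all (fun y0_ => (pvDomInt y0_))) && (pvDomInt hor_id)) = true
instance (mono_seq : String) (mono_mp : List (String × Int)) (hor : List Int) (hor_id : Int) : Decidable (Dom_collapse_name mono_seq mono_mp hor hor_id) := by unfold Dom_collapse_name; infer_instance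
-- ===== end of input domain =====

-- B replaces A's single interleaved loop (string building with conditional flushes) by three
-- passes — map monomers to indices, group into consecutive (start,end) runs, render with one
-- join; the single-element shortcut and the final formatting block are unchanged (objective:
-- alternative decomposition, no speed claim).

-- ===== shared helpers (code both Pythons contain verbatim) =====

-- dict lookup mono_mp[m]; Pre_ guarantees the key is present, so the default 0 is never
-- returned on admitted inputs (Python raises KeyError there; those inputs are outside Pre_).
def pvLook (mono_mp : List (String × Int)) (m : List Char) : Int :=
  ((PySem.Dict.mk (mono_mp.map (fun p => (p.1.toList, p.2)))).get? m).getD 0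

-- the len(mono_lst)==1 branch (identical in A and B); Pre_ guarantees 2 ≤ m0.length,
-- so the pyGetD defaults are never returned (Python raises IndexError there).
def pvSingle (m0 : List Char) : List Char :=
  let rev : List Char := if PySem.Chars.endswith m0 ['\''] then ['\''] else []
  if PySem.Chars.isIn [PySem.List.pyGetD m0 1 ' '] "0123456789X".toList then
    PySem.List.pyGetD m0 0 ' ' :: rev
  else
    PySem.List.slice m0 none (some 2) ++ rev

-- str(start) + "-" + str(end)
def pvEmit (s e : Int) : List Char := PySem.Int.toChars s ++ '-' :: PySem.Int.toChars e

-- the final hor/hor_id/p<sub> formatting block (identical in A and B)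
def pvTail (res : List Char) (start e : Int) (nlst : Int) (hor : List Int) (hor_id : Int) : List Char :=
  if nlst = PySem.List.pyGetD hor 1 0 ∧ hor_id = 0 then
    let num := if start < 0 then
        '-' :: PySem.List.pyGetD (PySem.Chars.splitOn (PySem.List.slice res (some 1) none) ['-']) 0 []
      else PySem.List.pyGetD (PySem.Chars.splitOn res ['-']) 0 []
    "c<sub>".toList ++ num ++ "</sub>".toList
  else if nlst = PySem.List.pyGetD hor 1 0 ∧ hor_id > 0 then
    let num := if start < 0 then
        '-' :: PySem.List.pyGetD (PySem.Chars.splitOn (PySem.List.slice res (some 1) none) ['-']) 0 []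
      else PySem.List.pyGetD (PySem.Chars.splitOn res ['-']) 0 []
    "c".toList ++ PySem.Int.toChars hor_id ++ "<sub>".toList ++ num ++ "</sub>".toList
  else
    let s0 := PySem.List.pyGetD (PySem.Chars.splitOn res ['-']) 0 []
    let e0 := PySem.List.pyGetD (PySem.Chars.splitOn res ['-']) (-1) []
    let s1 := if start < 0 then
        '-' :: PySem.List.pyGetD (PySem.Chars.splitOn (PySem.List.slice res (some 1) none) ['-']) 0 []
      else s0
    let e1 := if e < 0 then '-' :: PySem.List.pyGetD (PySem.Chars.splitOn res ['-']) (-1) [] else e0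
    "p<sub>".toList ++ s1 ++ ['-'] ++ e1 ++ "</sub>".toList

-- ===== PORT A =====

-- one iteration of A's loop body, applied to mono_mp[mono_lst[i-1]] and mono_mp[mono_lst[i]]
def pvStepA (st : List Char × Int × Int) (prev cur : Int) : List Char × Int × Int :=
  if prev + 1 = cur then (st.1, st.2.1, cur)
  else ((if st.2.2 ≥ st.2.1 ∨ (st.2.1 < 0 ∧ st.2.2 ≤ st.2.1)
         then st.1 ++ pvEmit st.2.1 st.2.2 ++ [',']
         else st.1 ++ PySem.Int.toChars st.2.1 ++ [',']), cur, cur)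

def collapse_name (mono_seq : String) (mono_mp : List (String × Int)) (hor : List Int) (hor_id : Int) : String :=
  let mono_lst := PySem.Chars.splitOn mono_seq.toList [',']
  if mono_lst.length = 1 then String.ofList (pvSingle (mono_lst.getD 0 []))
  else
    let look := pvLook mono_mp
    let st0 : List Char × Int × Int :=
      ([], look (PySem.List.pyGetD mono_lst 0 []), look (PySem.List.pyGetD mono_lst 0 []))
    let st := (PySem.List.pyRange 1 (mono_lst.length : Int) 1).foldl
      (fun st i => pvStepA st (look (PySem.List.pyGetD mono_lst (i - 1) []))
                            (look (PySem.List.pyGetD mono_lst i []))) st0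
    let res := if st.2.2 ≥ st.2.1 ∨ (st.2.1 < 0 ∧ st.2.2 ≤ st.2.1)
               then st.1 ++ pvEmit st.2.1 st.2.2
               else st.1 ++ PySem.Int.toChars st.2.1
    String.ofList (pvTail res st.2.1 st.2.2 (mono_lst.length : Int) hor hor_id)

-- ===== PORT B =====

-- B's grouping step: extend the last run or open a new one
def pvStepB (gs : List (Int × Int)) (v : Int) : List (Int × Int) :=
  match gs.getLast? with
  | some (s0, e0) => if v = e0 + 1 then gs.dropLast ++ [(s0, v)] else gs ++ [(v, v)]
  | none => [(v, v)]

def collapse_name_alt (mono_seq : String) (mono_mp : List (String × Int)) (hor : List Int) (hor_id : Int) : String :=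
  let mono_lst := PySem.Chars.splitOn mono_seq.toList [',']
  if mono_lst.length = 1 then String.ofList (pvSingle (mono_lst.getD 0 []))
  else
    let idx := mono_lst.map (pvLook mono_mp)
    let groups := idx.foldl pvStepB []
    let res := PySem.Chars.join [','] (groups.map (fun p => pvEmit p.1 p.2))
    let se := PySem.List.pyGetD groups (-1) (0, 0)
    String.ofList (pvTail res se.1 se.2 (mono_lst.length : Int) hor hor_id)

-- ===== PRECONDITION & SPEC =====

-- Pre_ excludes exactly the inputs where the Python A raises: IndexError when the (single)
-- monomer has fewer than 2 characters, KeyError when some monomer is missing from mono_mp,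
-- IndexError when hor has fewer than 2 entries (mono_lst is never empty: split never returns []).
def Pre_collapse_name (mono_seq : String) (mono_mp : List (String × Int)) (hor : List Int) (hor_id : Int) : Prop :=
  PySem.Chars.splitOn mono_seq.toList [','] ≠ [] ∧
  ((PySem.Chars.splitOn mono_seq.toList [',']).length = 1 →
      2 ≤ ((PySem.Chars.splitOn mono_seq.toList [',']).getD 0 []).length) ∧
  ((PySem.Chars.splitOn mono_seq.toList [',']).length ≠ 1 →
      (∀ m ∈ PySem.Chars.splitOn mono_seq.toList [','],
        ((PySem.Dict.mk (mono_mp.map (fun p => (p.1.toList, p.2)))).get? m).isSome) ∧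
      2 ≤ hor.length)

instance (mono_seq : String) (mono_mp : List (String × Int)) (hor : List Int) (hor_id : Int) : Decidable (Pre_collapse_name mono_seq mono_mp hor hor_id) := by unfold Pre_collapse_name; infer_instance

def pvWitness_collapse_name : String × (List (String × Int)) × List Int × Int :=
  ("a,b", [("a", 1), ("b", 2)], [0, 2], 0)

def Spec_collapse_name (mono_seq : String) (mono_mp : List (String × Int)) (hor : List Int) (hor_id : Int) (out : String) : Prop := out = collapse_name_alt mono_seq mono_mp hor hor_id
instance (mono_seq : String) (mono_mp : List (String × Int)) (hor : List Int) (hor_id : Int) (out : String) : Decidable (Spec_collapse_name mono_seq mono_mp hor hor_id out) := by unfold Spec_collapse_name; infer_instance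

-- ===== CLAIM (what is proved, stated in full; the proofs are below) =====
def Claim_equal_collapse_name : Prop := ∀ (mono_seq : String) (mono_mp : List (String × Int)) (hor : List Int) (hor_id : Int), Dom_collapse_name mono_seq mono_mp hor hor_id → Pre_collapse_name mono_seq mono_mp hor hor_id → Spec_collapse_name mono_seq mono_mp hor hor_id (collapse_name mono_seq mono_mp hor hor_id)

-- ===== LEMMAS AND PROOFS =====

-- abstract run decomposition: maximal consecutive runs of s,e followed by vs
def pvRuns : Int → Int → List Int → List (Int × Int)
  | s, e, [] => [(s, e)]
  | s, e, v :: vs => if e + 1 = v then pvRuns s v vs else (s, e) :: pvRuns v v vs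

-- A's loop, rephrased on the value list (index bookkeeping removed)
def pvFinish : List Char → Int → Int → List Int → List Char × Int × Int
  | res, s, e, [] => (res, s, e)
  | res, s, e, v :: vs =>
      if e + 1 = v then pvFinish res s v vs
      else pvFinish (res ++ pvEmit s e ++ [',']) v v vs

lemma pvRuns_ne_nil (s e : Int) (vs : List Int) : pvRuns s e vs ≠ [] := by
  induction vs generalizing s e with
  | nil => simp [pvRuns]
  | cons v vs ih => simp only [pvRuns]; split <;> simp [ih]

lemma pyGetD_neg_one_cons_of_ne_nil (x : Int × Int) (l : List (Int × Int)) (h : l ≠ []) (d : Int × Int) :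
    PySem.List.pyGetD (x :: l) (-1) d = PySem.List.pyGetD l (-1) d := by
  rw [PySem.List.pyGetD_neg_one (x :: l) d (by simp), PySem.List.pyGetD_neg_one l d h,
    List.getLast_cons h]

-- fold A's index loop over pyRange into a fold over adjacent pairs of the value list
lemma pvBridge {σ : Type} (idx : List Int) (d : Int) (g : σ → Int → Int → σ) :
    ∀ (m k : Nat) (st : σ), idx.length = k + 1 + m →
    List.foldl (fun st i => g st (PySem.List.pyGetD idx (i - 1) d) (PySem.List.pyGetD idx i d)) st
      (PySem.List.pyRange ((k : Int) + 1) (idx.length : Int) 1)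
    = List.foldl (fun st p => g st p.1 p.2) st ((idx.drop k).zip (idx.drop (k + 1))) := by
  intro m
  induction m with
  | zero =>
      intro k st hlen
      rw [PySem.List.pyRange_one_eq_nil (by omega),
        List.drop_eq_nil_of_le (show idx.length ≤ k + 1 by omega), List.zip_nil_right]
      rfl
  | succ m ih =>
      intro k st hlen
      have hk : k < idx.length := by omega
      have hk1 : k + 1 < idx.length := by omega
      have e1 : PySem.List.pyGetD idx ((k : Int) + 1 - 1) d = idx[k] := by
        rw [show ((k : Int) + 1 - 1) = ((k : Nat) : Int) by ring,
          PySem.List.pyGetD_eq_getElem idx d (by positivity) (by exact_mod_cast hk)]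
        simp
      have e2 : PySem.List.pyGetD idx ((k : Int) + 1) d = idx[k + 1] := by
        rw [show ((k : Int) + 1) = ((k + 1 : Nat) : Int) by push_cast; ring,
          PySem.List.pyGetD_eq_getElem idx d (by positivity) (by exact_mod_cast hk1)]
        simp
      have hdk : idx.drop k = idx[k] :: idx.drop (k + 1) := List.drop_eq_getElem_cons hk
      have hdk1 : idx.drop (k + 1) = idx[k + 1] :: idx.drop (k + 1 + 1) :=
        List.drop_eq_getElem_cons hk1
      rw [PySem.List.pyRange_one_cons (by omega), hdk, hdk1]
      simp only [List.zip_cons_cons, List.foldl_cons]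
      rw [e1, e2]
      have := ih (k + 1) (g st idx[k] idx[k + 1]) (by omega)
      rw [hdk1] at this
      rw [show ((k : Int) + 1 + 1) = (((k + 1 : Nat) : Int) + 1) by push_cast; ring]
      exact this

-- A's pair fold equals pvFinish when the carried end equals the previous element
lemma pvChain : ∀ (vs : List Int) (res : List Char) (s e : Int), s ≤ e →
    List.foldl (fun st (p : Int × Int) => pvStepA st p.1 p.2) (res, s, e) ((e :: vs).zip vs)
    = pvFinish res s e vs := by
  intro vs
  induction vs with
  | nil => intro res s e _; rfl
  | cons v vs ih =>
      intro res s e hse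
      simp only [List.zip_cons_cons, List.foldl_cons, pvStepA, pvFinish]
      by_cases h : e + 1 = v
      · simp only [if_pos h]
        exact ih res s v (by omega)
      · simp only [if_neg h, if_pos (Or.inl hse)]
        exact ih _ v v le_rfl

-- pvFinish plus A's final flush = rendered runs, and its (start, end) = last run
lemma pvFinish_render : ∀ (vs : List Int) (res : List Char) (s e : Int), s ≤ e →
    ((if (pvFinish res s e vs).2.2 ≥ (pvFinish res s e vs).2.1 ∨
        ((pvFinish res s e vs).2.1 < 0 ∧ (pvFinish res s e vs).2.2 ≤ (pvFinish res s e vs).2.1)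
      then (pvFinish res s e vs).1 ++ pvEmit (pvFinish res s e vs).2.1 (pvFinish res s e vs).2.2
      else (pvFinish res s e vs).1 ++ PySem.Int.toChars (pvFinish res s e vs).2.1),
     (pvFinish res s e vs).2)
    = (res ++ PySem.Chars.join [','] ((pvRuns s e vs).map (fun p => pvEmit p.1 p.2)),
       PySem.List.pyGetD (pvRuns s e vs) (-1) (0, 0)) := by
  intro vs
  induction vs with
  | nil =>
      intro res s e hse
      simp only [pvFinish, pvRuns, List.map_cons, List.map_nil, PySem.Chars.join_singleton]
      rw [if_pos (Or.inl hse), PySem.List.pyGetD_neg_one [(s, e)] (0, 0) (by simp)]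
      simp
  | cons v vs ih =>
      intro res s e hse
      by_cases h : e + 1 = v
      · simp only [pvFinish, pvRuns, if_pos h]
        exact ih res s v (by omega)
      · simp only [pvFinish, pvRuns, if_neg h]
        rw [Prod.ext_iff]
        have hmain := ih (res ++ pvEmit s e ++ [',']) v v le_rfl
        rw [Prod.ext_iff] at hmain
        obtain ⟨h1, h2⟩ := hmain
        constructor
        · rw [h1]
          obtain ⟨q, rest, hq⟩ := List.exists_cons_of_ne_nil (pvRuns_ne_nil v v vs)
          rw [hq]
          simp only [List.map_cons, PySem.Chars.join_cons_cons]
          simp [List.append_assoc]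
        · rw [h2, List.map_cons]
          rw [pyGetD_neg_one_cons_of_ne_nil (s, e) _ (pvRuns_ne_nil v v vs) (0, 0)]

-- B's fold builds exactly the runs
lemma pvFoldB : ∀ (vs : List Int) (gs : List (Int × Int)) (s e : Int),
    List.foldl pvStepB (gs ++ [(s, e)]) vs = gs ++ pvRuns s e vs := by
  intro vs
  induction vs with
  | nil => intro gs s e; simp [pvRuns]
  | cons v vs ih =>
      intro gs s e
      simp only [List.foldl_cons, pvStepB, List.getLast?_concat, List.dropLast_concat, pvRuns]
      by_cases h : e + 1 = v
      · rw [if_pos (by omega : v = e + 1), ih, if_pos h]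
      · rw [if_neg (by omega : ¬ v = e + 1), if_neg h, List.append_assoc]
        have := ih (gs ++ [(s, e)]) v v
        simpa [List.append_assoc] using this

-- ===== VERDICT (by name: the statement is the Claim_ definition above) =====
theorem collapse_name_spec : Claim_equal_collapse_name := by
  intro mono_seq mono_mp hor hor_id _ hpre
  obtain ⟨hne, _h1, _h2⟩ := hpre
  unfold Spec_collapse_name collapse_name collapse_name_alt
  by_cases hl : (PySem.Chars.splitOn mono_seq.toList [',']).length = 1
  · simp only [if_pos hl]
  · simp only [if_neg hl]
    cases hsplit : PySem.Chars.splitOn mono_seq.toList [','] with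
    | nil => exact absurd hsplit hne
    | cons m0 tl =>
      rw [hsplit] at hl
      have hmap : ∀ i : Int, pvLook mono_mp (PySem.List.pyGetD (m0 :: tl) i []) =
          PySem.List.pyGetD ((m0 :: tl).map (pvLook mono_mp)) i (pvLook mono_mp []) :=
        fun i => (PySem.List.pyGetD_map (pvLook mono_mp) (m0 :: tl) i []).symm
      simp only [hmap, List.map_cons, PySem.List.pyGetD_zero_cons]
      have hb := pvBridge (pvLook mono_mp m0 :: List.map (pvLook mono_mp) tl) (pvLook mono_mp [])
        pvStepA tl.length 0 ([], pvLook mono_mp m0, pvLook mono_mp m0) (by simp; omega)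
      simp only [Nat.cast_zero, zero_add, List.length_cons, List.length_map, List.drop_zero,
        List.drop_succ_cons] at hb
      simp only [List.length_cons]
      rw [hb, pvChain (List.map (pvLook mono_mp) tl) [] (pvLook mono_mp m0) (pvLook mono_mp m0)
        le_rfl]
      have hrender := pvFinish_render (List.map (pvLook mono_mp) tl) [] (pvLook mono_mp m0)
        (pvLook mono_mp m0) le_rfl
      rw [Prod.ext_iff] at hrender
      obtain ⟨hr1, hr2⟩ := hrender
      dsimp only at hr1 hr2
      rw [hr1, hr2]
      simp only [List.foldl_cons, pvStepB, List.getLast?_nil]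
      have hfoldB := pvFoldB (List.map (pvLook mono_mp) tl) [] (pvLook mono_mp m0)
        (pvLook mono_mp m0)
      simp only [List.nil_append] at hfoldB
      rw [hfoldB]
      simp
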